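-- pv_equiv track=rewrite | github.com/Raghad-ali/python-projects | ArrayShift.py | toWhichDirection
-- ===== SOURCE A (Python) =====
-- def toWhichDirection(abdullah_array:list,mohammed_array:list)->str:
--     sss=int(len(abdullah_array)/2)
--     if len(abdullah_array) %2==1:
--         sss+=1
--
--     for i in range(1,sss):
--         lis=abdullah_array[i:]+abdullah_array[:i]
--         if lis==mohammed_array:
--             return 'L'
--     return 'R'
-- ===== SOURCE B (Python) =====
-- def toWhichDirection(abdullah_array: list, mohammed_array: list) -> str:
--     # KMP search: the task asks whether mohammed_array equals abdullah_array
--     # left-rotated by some offset i in [1, ceil(n/2)-1].  Those rotations are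
--     # exactly the length-n windows of abdullah_array + abdullah_array[:hi-1]
--     # starting at i >= 1, so one linear KMP scan replaces A's per-offset
--     # rebuild-and-compare loop: O(n) instead of O(n^2).
--     n = len(abdullah_array)
--     hi = (n + 1) // 2            # offsets checked are 1 .. hi-1
--     if len(mohammed_array) != n or hi < 2:
--         return 'R'
--     m = mohammed_array
--     pi = [0] * n                 # prefix function of the pattern m
--     k = 0
--     for q in range(1, n):
--         while k and m[q] != m[k]:
--             k = pi[k - 1]
--         if m[q] == m[k]:
--             k += 1
--         pi[q] = k
--     t = abdullah_array + abdullah_array[:hi - 1]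
--     k = 0
--     for idx in range(len(t)):
--         if k == n:               # full match ended at idx-1; keep scanning
--             k = pi[k - 1]
--         while k and t[idx] != m[k]:
--             k = pi[k - 1]
--         if t[idx] == m[k]:
--             k += 1
--         if k == n and idx >= n:  # match starts at idx-n+1 >= 1
--             return 'L'
--     return 'R'
-- ===== Notes on version B (the rewrite author's own statement) =====
-- stated objective: faster
-- what changed: B replaces A's per-offset rebuild-and-compare of each rotation (O(n) work per offset) by a single KMP scan: it builds the prefix function of mohammed_array and scans abdullah_array + abdullah_array[:ceil(n/2)-2+1] once, reporting 'L' on any full match starting at offset >= 1.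
import Mathlib
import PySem

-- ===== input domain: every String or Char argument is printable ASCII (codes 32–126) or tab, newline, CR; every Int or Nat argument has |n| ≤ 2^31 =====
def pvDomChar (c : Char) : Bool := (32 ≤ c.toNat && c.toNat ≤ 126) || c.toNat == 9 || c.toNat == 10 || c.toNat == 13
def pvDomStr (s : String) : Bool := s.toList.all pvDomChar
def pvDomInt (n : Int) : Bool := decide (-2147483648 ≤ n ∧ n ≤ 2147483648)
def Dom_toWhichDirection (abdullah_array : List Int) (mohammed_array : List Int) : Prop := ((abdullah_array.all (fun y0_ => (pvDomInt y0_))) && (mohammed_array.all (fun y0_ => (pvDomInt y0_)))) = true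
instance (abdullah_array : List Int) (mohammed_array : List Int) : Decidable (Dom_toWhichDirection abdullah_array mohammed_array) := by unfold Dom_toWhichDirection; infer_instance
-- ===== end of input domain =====

-- B replaces A's per-offset rebuild-and-compare of each rotation by a single KMP scan of
-- abdullah_array ++ abdullah_array[:ceil(n/2)-1] for the pattern mohammed_array (objective: faster).

-- ===== PORT A =====
-- the 'for i in range(1, sss): … return 'L' … / return 'R'' loop, as recursion over the range list
def toWhichDirectionGoA (abdullah mohammed : List Int) : List Int → String
  | [] => "R"
  | i :: rest =>
    -- lis = abdullah_array[i:] + abdullah_array[:i]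
    let lis := PySem.List.slice abdullah (some i) none ++ PySem.List.slice abdullah none (some i)
    if lis = mohammed then "L" else toWhichDirectionGoA abdullah mohammed rest

def toWhichDirection (abdullah_array : List Int) (mohammed_array : List Int) : String :=
  -- sss = int(len(abdullah_array)/2): for a nonnegative length this is floor division by 2
  let sss0 : Int := PySem.Int.floordiv (abdullah_array.length : Int) 2
  let sss : Int := if PySem.Int.mod (abdullah_array.length : Int) 2 = 1 then sss0 + 1 else sss0
  toWhichDirectionGoA abdullah_array mohammed_array (PySem.List.pyRange 1 sss 1)

-- ===== PORT B =====
-- 'while k and x != m[k]: k = pi[k-1]' — fuel is the entry value of k: each turn strictly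
-- decreases k (pi[k-1] ≤ k-1, proved in pvFall_spec), so the fuel is never exhausted
def pvFall (m : List Int) (pi : List Nat) (x : Int) : Nat → Nat → Nat
  | 0, k => if k ≠ 0 ∧ x ≠ m.getD k 0 then 0 else k
  | fuel+1, k => if k ≠ 0 ∧ x ≠ m.getD k 0 then pvFall m pi x fuel (pi.getD (k-1) 0) else k

-- the while loop followed by 'if x == m[k]: k += 1' (this pair appears twice in Source B)
def pvStepVal (m : List Int) (pi : List Nat) (x : Int) (k : Nat) : Nat :=
  let r := pvFall m pi x k k
  if x = m.getD r 0 then r + 1 else r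

-- 'for q in range(1, n): …; pi[q] = k' — entries are assigned in index order, so the
-- fixed-size Python list written left to right is built here by appending; q = pi.length
def pvPiLoop (m : List Int) : Nat → List Nat × Nat → List Nat × Nat
  | 0, s => s
  | c+1, (pi, k) =>
      let k' := pvStepVal m pi (m.getD pi.length 0) k
      pvPiLoop m c (pi ++ [k'], k')

-- 'for idx in range(len(t)): if k == n: k = pi[k-1]; <while/if>; if k == n and idx >= n: return 'L''
def pvScan (m : List Int) (pi : List Nat) (n : Nat) : List Int → Nat → Nat → String
  | [], _, _ => "R"
  | x :: rest, idx, k =>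
      let k0 := if k = n then pi.getD (n-1) 0 else k
      let k2 := pvStepVal m pi x k0
      if k2 = n ∧ n ≤ idx then "L" else pvScan m pi n rest (idx+1) k2

def toWhichDirection_alt (abdullah_array : List Int) (mohammed_array : List Int) : String :=
  -- hi = (n + 1) // 2 : lengths are nonnegative, so Python's // 2 is Nat division here
  if mohammed_array.length ≠ abdullah_array.length ∨ (abdullah_array.length + 1) / 2 < 2 then "R"
  else
    pvScan mohammed_array
      (pvPiLoop mohammed_array (abdullah_array.length - 1) ([0], 0)).1
      abdullah_array.length
      (abdullah_array ++ abdullah_array.take ((abdullah_array.length + 1) / 2 - 1)) 0 0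

-- ===== PRECONDITION & SPEC =====
def Spec_toWhichDirection (abdullah_array : List Int) (mohammed_array : List Int) (out : String) : Prop := out = toWhichDirection_alt abdullah_array mohammed_array
instance (abdullah_array : List Int) (mohammed_array : List Int) (out : String) : Decidable (Spec_toWhichDirection abdullah_array mohammed_array out) := by unfold Spec_toWhichDirection; infer_instance

-- ===== CLAIM (what is proved, stated in full; the proofs are below) =====
def Claim_equal_toWhichDirection : Prop := ∀ (abdullah_array : List Int) (mohammed_array : List Int), Dom_toWhichDirection abdullah_array mohammed_array → Spec_toWhichDirection abdullah_array mohammed_array (toWhichDirection abdullah_array mohammed_array)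

-- ===== LEMMAS AND PROOFS =====

-- a suffix of w that is no longer than another suffix of w is a suffix of it
theorem pvSufOfSuf {u v w : List Int} (h1 : u <:+ w) (h2 : v <:+ w)
    (h : u.length ≤ v.length) : u <:+ v := by
  rw [← List.reverse_prefix] at h1 h2 ⊢
  exact List.prefix_of_prefix_length_le h1 h2 (by simpa)

-- pi.getD q 0 is the longest proper border of m.take (q+1), for every q < pi.length
def PiSpec (m : List Int) (pi : List Nat) : Prop :=
  ∀ q, q < pi.length → pi.getD q 0 ≤ q ∧ m.take (pi.getD q 0) <:+ m.take (q+1) ∧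
    ∀ b, b ≤ q → m.take b <:+ m.take (q+1) → b ≤ pi.getD q 0

theorem pvFall_spec (m : List Int) (pi : List Nat) (x : Int) (hpi : PiSpec m pi) :
    ∀ fuel k, k ≤ fuel → k ≤ pi.length →
      pvFall m pi x fuel k ≤ k ∧
      m.take (pvFall m pi x fuel k) <:+ m.take k ∧
      (pvFall m pi x fuel k = 0 ∨ x = m.getD (pvFall m pi x fuel k) 0) ∧
      ∀ b, b ≤ k → m.take b <:+ m.take k → x = m.getD b 0 → b ≤ pvFall m pi x fuel k := by
  intro fuel
  induction fuel with
  | zero =>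
    intro k hk _
    have hk0 : k = 0 := by omega
    subst hk0
    simp [pvFall]
  | succ fuel ih =>
    intro k hk hkpi
    by_cases hcond : k ≠ 0 ∧ x ≠ m.getD k 0
    · have heq : pvFall m pi x (fuel+1) k = pvFall m pi x fuel (pi.getD (k-1) 0) := by
        show (if k ≠ 0 ∧ x ≠ m.getD k 0 then _ else k) = _
        rw [if_pos hcond]
      have hq := hpi (k-1) (by omega)
      obtain ⟨hq1, hq2, hq3⟩ := hq
      have hk1 : k - 1 + 1 = k := by omega
      rw [hk1] at hq2 hq3
      obtain ⟨ih1, ih2, ih3, ih4⟩ := ih (pi.getD (k-1) 0) (by omega) (by omega)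
      rw [heq]
      refine ⟨by omega, ih2.trans hq2, ih3, ?_⟩
      intro b hb hbs hbx
      have hbk : b ≠ k := by
        intro h; subst h; exact hcond.2 hbx
      have hb1 : b ≤ pi.getD (k-1) 0 := hq3 b (by omega) hbs
      have hbs' : m.take b <:+ m.take (pi.getD (k-1) 0) :=
        pvSufOfSuf hbs hq2 (by simp only [List.length_take]; omega)
      exact ih4 b hb1 hbs' hbx
    · have heq : pvFall m pi x (fuel+1) k = k := by
        show (if k ≠ 0 ∧ x ≠ m.getD k 0 then pvFall m pi x fuel (pi.getD (k-1) 0) else k) = k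
        rw [if_neg hcond]
      rw [heq]
      refine ⟨le_rfl, List.suffix_refl _, ?_, fun b hb _ _ => hb⟩
      by_cases h0 : k = 0
      · exact Or.inl h0
      · push_neg at hcond
        exact Or.inr (hcond h0)

-- u ++ [c] is a suffix of s ++ [x] iff c = x and u is a suffix of s
theorem pvConcatSuffix (u s : List Int) (c x : Int) :
    u ++ [c] <:+ s ++ [x] ↔ c = x ∧ u <:+ s := by
  rw [← List.reverse_prefix]
  simp only [List.reverse_append, List.reverse_singleton, List.singleton_append]
  rw [List.cons_prefix_cons, List.reverse_prefix]

-- characterizes nonzero-length borders of s ++ [x]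
theorem pvBorderSucc (m s : List Int) (x : Int) (b : Nat) (hb1 : 1 ≤ b) (hbn : b ≤ m.length) :
    (m.take b <:+ s ++ [x] ↔ m.take (b-1) <:+ s ∧ m.getD (b-1) 0 = x) := by
  have hlt : b - 1 < m.length := by omega
  have hsplit : m.take b = m.take (b-1) ++ [m.getD (b-1) 0] := by
    have hb : b - 1 + 1 = b := by omega
    rw [← hb, List.take_add_one, List.getElem?_eq_getElem hlt]
    simp only [Nat.add_sub_cancel, Option.toList_some]
    rw [List.getD_eq_getElem _ _ hlt]
  rw [hsplit, pvConcatSuffix]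
  tauto

theorem pvStep_spec (m : List Int) (pi : List Nat) (x : Int) (s : List Int) (k0 c : Nat)
    (hpi : PiSpec m pi) (hc : c ≤ m.length) (hk : k0 < c) (hkpi : k0 ≤ pi.length)
    (hsuf : m.take k0 <:+ s) (hmax : ∀ b, b < c → m.take b <:+ s → b ≤ k0) :
    pvStepVal m pi x k0 ≤ c ∧ m.take (pvStepVal m pi x k0) <:+ s ++ [x] ∧
      ∀ b, b ≤ c → m.take b <:+ s ++ [x] → b ≤ pvStepVal m pi x k0 := by
  obtain ⟨hr_le, hr_suf, hr_or, hr_max⟩ := pvFall_spec m pi x hpi k0 k0 le_rfl hkpi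
  have key : ∀ b, 1 ≤ b → b ≤ c → m.take b <:+ s ++ [x] →
      b - 1 ≤ pvFall m pi x k0 k0 ∧ x = m.getD (b-1) 0 := by
    intro b hb1 hbc hbs
    rw [pvBorderSucc m s x b hb1 (le_trans hbc hc)] at hbs
    obtain ⟨hbs, hbx⟩ := hbs
    have hbk : b - 1 ≤ k0 := hmax (b-1) (by omega) hbs
    have hbs' : m.take (b-1) <:+ m.take k0 :=
      pvSufOfSuf hbs hsuf (by simp only [List.length_take]; omega)
    exact ⟨hr_max (b-1) hbk hbs' hbx.symm, hbx.symm⟩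
  unfold pvStepVal
  by_cases hx : x = m.getD (pvFall m pi x k0 k0) 0
  · rw [if_pos hx]
    refine ⟨by omega, ?_, ?_⟩
    · rw [pvBorderSucc m s x _ (by omega) (by omega)]
      exact ⟨by simpa using hr_suf.trans hsuf, by simpa using hx.symm⟩
    · intro b hbc hbs
      rcases Nat.eq_zero_or_pos b with h0 | h1
      · omega
      · have := (key b h1 hbc hbs).1; omega
  · rw [if_neg hx]
    have hr0 : pvFall m pi x k0 k0 = 0 := by
      rcases hr_or with h | h
      · exact h
      · exact absurd h hx
    refine ⟨by omega, by simp [hr0, List.nil_suffix], ?_⟩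
    intro b hbc hbs
    rcases Nat.eq_zero_or_pos b with h0 | h1
    · omega
    · obtain ⟨hle, hxx⟩ := key b h1 hbc hbs
      rw [hr0] at hle
      have : b - 1 = 0 := by omega
      rw [this] at hxx
      rw [hr0] at hx
      exact absurd hxx hx

theorem pvPiLoop_spec (m : List Int) : ∀ c pi k,
    PiSpec m pi → pi.length + c = m.length → 1 ≤ pi.length →
    k < pi.length → m.take k <:+ m.take pi.length →
    (∀ b, b < pi.length → m.take b <:+ m.take pi.length → b ≤ k) →
    PiSpec m (pvPiLoop m c (pi, k)).1 ∧ (pvPiLoop m c (pi, k)).1.length = m.length := by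
  intro c
  induction c with
  | zero =>
    intro pi k hpi hlen _ _ _ _
    refine ⟨hpi, ?_⟩
    show pi.length = m.length
    omega
  | succ c ih =>
    intro pi k hpi hlen h1 hk hsuf hmax
    have hq : pi.length < m.length := by omega
    have hgetD : m.getD pi.length 0 = m[pi.length] := List.getD_eq_getElem _ _ hq
    have htake : m.take pi.length ++ [m.getD pi.length 0] = m.take (pi.length + 1) := by
      rw [List.take_add_one, List.getElem?_eq_getElem hq, hgetD]
      rfl
    obtain ⟨hs1, hs2, hs3⟩ :=
      pvStep_spec m pi (m.getD pi.length 0) (m.take pi.length) k pi.length hpi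
        (le_of_lt hq) hk (le_of_lt hk) hsuf hmax
    rw [htake] at hs2 hs3
    set k' := pvStepVal m pi (m.getD pi.length 0) k with hk'
    have hstep : pvPiLoop m (c+1) (pi, k) = pvPiLoop m c (pi ++ [k'], k') := rfl
    have hgd_lt : ∀ j, j < pi.length → (pi ++ [k']).getD j 0 = pi.getD j 0 := by
      intro j hj
      rw [List.getD_eq_getElem?_getD, List.getElem?_append_left hj, ← List.getD_eq_getElem?_getD]
    have hgd_q : (pi ++ [k']).getD pi.length 0 = k' := by
      rw [List.getD_eq_getElem?_getD, List.getElem?_append_right le_rfl]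
      simp
    have hpi' : PiSpec m (pi ++ [k']) := by
      intro j hj
      simp only [List.length_append, List.length_singleton] at hj
      rcases Nat.lt_or_ge j pi.length with hlt | hge
      · rw [hgd_lt j hlt]; exact hpi j hlt
      · have hjq : j = pi.length := by omega
        subst hjq
        rw [hgd_q]
        exact ⟨hs1, hs2, fun b hb hbs => hs3 b hb hbs⟩
    have hL2 : (pi ++ [k']).length = pi.length + 1 := by simp
    have hres := ih (pi ++ [k']) k' hpi' (by rw [hL2]; omega) (by rw [hL2]; omega)
      (by rw [hL2]; omega) (by rw [hL2]; exact hs2)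
      (by rw [hL2]; exact fun b hb hbs => hs3 b (by omega) hbs)
    rw [hstep]
    exact hres

-- the scan's loop invariant: k is the longest prefix of m that is a suffix of the text read so far
def ScanInv (m done : List Int) (k : Nat) : Prop :=
  k ≤ m.length ∧ m.take k <:+ done ∧ ∀ b, b ≤ m.length → m.take b <:+ done → b ≤ k

theorem pvScan_LR (m : List Int) (pi : List Nat) (n : Nat) :
    ∀ rest idx k, pvScan m pi n rest idx k = "L" ∨ pvScan m pi n rest idx k = "R" := by
  intro rest
  induction rest with
  | nil => intro idx k; right; rfl
  | cons x rest ih =>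
    intro idx k
    by_cases h : pvStepVal m pi x (if k = n then pi.getD (n - 1) 0 else k) = n ∧ n ≤ idx
    · left
      show (if pvStepVal m pi x (if k = n then pi.getD (n - 1) 0 else k) = n ∧ n ≤ idx then "L"
        else pvScan m pi n rest (idx + 1)
          (pvStepVal m pi x (if k = n then pi.getD (n - 1) 0 else k))) = "L"
      rw [if_pos h]
    · have heq : pvScan m pi n (x :: rest) idx k =
          pvScan m pi n rest (idx + 1)
            (pvStepVal m pi x (if k = n then pi.getD (n - 1) 0 else k)) := by
        show (if pvStepVal m pi x (if k = n then pi.getD (n - 1) 0 else k) = n ∧ n ≤ idx then "L"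
          else _) = _
        rw [if_neg h]
      rw [heq]
      exact ih _ _

theorem pvScan_spec (m : List Int) (pi : List Nat) (hpi : PiSpec m pi)
    (hlen : pi.length = m.length) (hm1 : 1 ≤ m.length) (n : Nat) (hn : n = m.length) :
    ∀ rest done k, ScanInv m done k →
      (pvScan m pi n rest done.length k = "L" ↔
       ∃ j, 1 ≤ j ∧ j ≤ rest.length ∧ n + 1 ≤ done.length + j ∧ m <:+ done ++ rest.take j) := by
  subst hn
  intro rest
  induction rest with
  | nil =>
    intro done k _
    constructor
    · intro h; exact absurd h (by simp [pvScan])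
    · rintro ⟨j, h1, h2, _⟩
      simp at h2; omega
  | cons x rest ih =>
    intro done k hinv
    obtain ⟨hk_le, hk_suf, hk_max⟩ := hinv
    -- after the 'if k == n' reset the state is the longest PROPER border of the text read
    have hreset : (if k = m.length then pi.getD (m.length-1) 0 else k) < m.length ∧
        m.take (if k = m.length then pi.getD (m.length-1) 0 else k) <:+ done ∧
        (∀ b, b < m.length → m.take b <:+ done →
          b ≤ (if k = m.length then pi.getD (m.length-1) 0 else k)) := by
      by_cases hkn : k = m.length
      · rw [if_pos hkn]
        have hmd : m <:+ done := by
          have := hk_suf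
          rw [hkn, List.take_length] at this
          exact this
        obtain ⟨hq1, hq2, hq3⟩ := hpi (m.length-1) (by omega)
        have hn1 : m.length - 1 + 1 = m.length := by omega
        rw [hn1] at hq2 hq3
        have hq2' : m.take (pi.getD (m.length-1) 0) <:+ m := by
          rw [List.take_length] at hq2; exact hq2
        refine ⟨by omega, hq2'.trans hmd, ?_⟩
        intro b hb hbs
        have hbm : m.take b <:+ m := pvSufOfSuf hbs hmd (by simp only [List.length_take]; omega)
        have hbm' : m.take b <:+ m.take m.length := by rw [List.take_length]; exact hbm
        exact hq3 b (by omega) hbm'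
      · rw [if_neg hkn]
        exact ⟨by omega, hk_suf, fun b hb hbs => hk_max b (by omega) hbs⟩
    obtain ⟨hr_lt, hr_suf, hr_max⟩ := hreset
    set k0 := if k = m.length then pi.getD (m.length-1) 0 else k with hk0
    obtain ⟨hs1, hs2, hs3⟩ :=
      pvStep_spec m pi x done k0 m.length hpi (by omega) hr_lt (by omega) hr_suf hr_max
    set k2 := pvStepVal m pi x k0 with hk2def
    have hmatch : k2 = m.length ↔ m <:+ done ++ [x] := by
      constructor
      · intro h
        have := hs2
        rw [h, List.take_length] at this
        exact this
      · intro h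
        have : m.length ≤ k2 := by
          apply hs3 m.length le_rfl
          rw [List.take_length]; exact h
        omega
    have hunfold : pvScan m pi m.length (x :: rest) done.length k =
        if k2 = m.length ∧ m.length ≤ done.length then "L"
        else pvScan m pi m.length rest (done.length + 1) k2 := rfl
    rw [hunfold]
    by_cases hret : k2 = m.length ∧ m.length ≤ done.length
    · rw [if_pos hret]
      constructor
      · intro _
        exact ⟨1, le_rfl, by simp, by omega, by simpa using hmatch.mp hret.1⟩
      · intro _; rfl
    · rw [if_neg hret]
      have hinv' : ScanInv m (done ++ [x]) k2 := ⟨hs1, hs2, fun b hb hbs => hs3 b hb hbs⟩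
      have hlen' : (done ++ [x]).length = done.length + 1 := by simp
      have hih := ih (done ++ [x]) k2 hinv'
      rw [hlen'] at hih
      rw [hih]
      constructor
      · rintro ⟨j, hj1, hj2, hj3, hj4⟩
        refine ⟨j + 1, by omega, by simpa using hj2, by omega, ?_⟩
        rw [List.take_succ_cons]
        simpa [List.append_assoc] using hj4
      · rintro ⟨j, hj1, hj2, hj3, hj4⟩
        have hj1' : ∃ j', j = j' + 1 := ⟨j - 1, by omega⟩
        obtain ⟨j', rfl⟩ := hj1'
        rw [List.take_succ_cons] at hj4
        have hj4' : m <:+ (done ++ [x]) ++ rest.take j' := by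
          simpa [List.append_assoc] using hj4
        refine ⟨j', ?_, by simpa using hj2, by omega, hj4'⟩
        -- j' ≥ 1: otherwise the match ends exactly at x and the 'L' branch would have fired
        by_contra hj0
        push_neg at hj0
        have hj'0 : j' = 0 := by omega
        subst hj'0
        simp at hj4'
        exact hret ⟨hmatch.mpr hj4', by omega⟩

-- A's loop returns 'L' iff some offset in the range matches
theorem goA_eq (a m : List Int) (l : List Int) :
    toWhichDirectionGoA a m l =
      if ∃ i ∈ l, PySem.List.slice a (some i) none ++ PySem.List.slice a none (some i) = m
      then "L" else "R" := by
  induction l with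
  | nil => simp [toWhichDirectionGoA]
  | cons i rest ih =>
    show (if PySem.List.slice a (some i) none ++ PySem.List.slice a none (some i) = m
          then "L" else toWhichDirectionGoA a m rest) = _
    by_cases h : PySem.List.slice a (some i) none ++ PySem.List.slice a none (some i) = m
    · simp [h]
    · rw [if_neg h, ih]
      congr 1
      simp [h]

-- the length-n window of a ++ a.take w starting at i is the rotation of a by i
theorem pvWindow (a : List Int) (i w : Nat) (hw : w ≤ a.length) (hi : i ≤ w) :
    ((a ++ a.take w).take (a.length + i)).drop i = a.drop i ++ a.take i := by
  rw [List.take_length_add_append, List.take_take]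
  have h2 : min i w = i := by omega
  rw [h2, List.drop_append_of_le_length (by omega)]

-- the same fact with the window end given as an absolute position j
theorem pvWindow' (a : List Int) (j w : Nat) (hw : w ≤ a.length) (hj1 : a.length ≤ j)
    (hj2 : j - a.length ≤ w) :
    ((a ++ a.take w).take j).drop (j - a.length) =
      a.drop (j - a.length) ++ a.take (j - a.length) := by
  obtain ⟨i, rfl⟩ : ∃ i, j = a.length + i := ⟨j - a.length, by omega⟩
  have h : a.length + i - a.length = i := by omega
  rw [h]
  exact pvWindow a i w hw (by omega)

-- ===== VERDICT helper: the final assembly =====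
theorem toWhichDirection_spec : Claim_equal_toWhichDirection := by
  intro a m _
  show toWhichDirection a m = toWhichDirection_alt a m
  rw [toWhichDirection, toWhichDirection_alt]
  have hS : (if PySem.Int.mod (a.length : Int) 2 = 1
      then PySem.Int.floordiv (a.length : Int) 2 + 1
      else PySem.Int.floordiv (a.length : Int) 2) = (((a.length + 1) / 2 : Nat) : Int) := by
    rw [PySem.Int.mod_eq_emod_of_pos (by norm_num), PySem.Int.floordiv_eq_ediv_of_pos (by norm_num)]
    by_cases h : (a.length : Int) % 2 = 1
    · rw [if_pos h]; omega
    · rw [if_neg h]; omega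
  simp only [hS, goA_eq]
  by_cases hg : m.length ≠ a.length ∨ (a.length + 1) / 2 < 2
  · rw [if_pos hg, if_neg]
    rintro ⟨i, hmem, hcond⟩
    rw [PySem.List.mem_pyRange_one] at hmem
    obtain ⟨h1, h2⟩ := hmem
    have hhi : 2 ≤ (a.length + 1) / 2 := by
      have : (1 : Int) < (((a.length + 1) / 2 : Nat) : Int) := lt_of_le_of_lt h1 h2
      exact_mod_cast this
    have hml : m.length ≠ a.length := by
      rcases hg with h | h
      · exact h
      · omega
    have h0 : 0 ≤ i := by omega
    rw [PySem.List.slice_from a h0, PySem.List.slice_to a h0] at hcond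
    have hlen := congrArg List.length hcond
    simp only [List.length_append, List.length_drop, List.length_take] at hlen
    have hitop : (i.toNat : Int) < (((a.length + 1) / 2 : Nat) : Int) := by
      rwa [Int.toNat_of_nonneg h0]
    have hit : i.toNat < (a.length + 1) / 2 := by exact_mod_cast hitop
    omega
  · rw [if_neg hg]
    push_neg at hg
    obtain ⟨hml, hhi⟩ := hg
    have hn3 : 3 ≤ a.length := by omega
    -- prefix-function correctness
    have hpi0 : PiSpec m [0] := by
      intro q hq
      simp only [List.length_singleton] at hq
      have hq0 : q = 0 := by omega
      subst hq0
      refine ⟨by simp, by simp [List.nil_suffix], ?_⟩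
      intro b hb _
      simpa using hb
    obtain ⟨hPiSpec, hPiLen⟩ := pvPiLoop_spec m (a.length - 1) [0] 0 hpi0
      (by simp only [List.length_singleton]; omega) (by simp) (by simp)
      (by simp [List.nil_suffix])
      (by intro b hb _; simp only [List.length_singleton] at hb; omega)
    -- scan correctness, from the empty text prefix
    have hinv0 : ScanInv m [] 0 := by
      refine ⟨by omega, by simp, ?_⟩
      intro b hb hbs
      rw [List.suffix_nil] at hbs
      have hlb := congrArg List.length hbs
      simp only [List.length_take, List.length_nil] at hlb
      omega
    have hscan := pvScan_spec m _ hPiSpec hPiLen (by omega) a.length hml.symm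
      (a ++ a.take ((a.length + 1) / 2 - 1)) [] 0 hinv0
    simp only [List.length_nil, List.nil_append, Nat.zero_add] at hscan
    -- bridge the two existentials
    have htlen : (a ++ a.take ((a.length + 1) / 2 - 1)).length
        = a.length + ((a.length + 1) / 2 - 1) := by
      simp [List.length_append, List.length_take]
      omega
    have hwle : (a.length + 1) / 2 - 1 ≤ a.length := by omega
    have hiff : (∃ i ∈ PySem.List.pyRange 1 (((a.length + 1) / 2 : Nat) : Int) 1,
        PySem.List.slice a (some i) none ++ PySem.List.slice a none (some i) = m) ↔
        (∃ j, 1 ≤ j ∧ j ≤ (a ++ a.take ((a.length + 1) / 2 - 1)).length ∧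
          a.length + 1 ≤ j ∧ m <:+ (a ++ a.take ((a.length + 1) / 2 - 1)).take j) := by
      constructor
      · rintro ⟨i, hmem, hcond⟩
        rw [PySem.List.mem_pyRange_one] at hmem
        obtain ⟨h1, h2⟩ := hmem
        have h0 : 0 ≤ i := by omega
        rw [PySem.List.slice_from a h0, PySem.List.slice_to a h0] at hcond
        have hit : i.toNat < (a.length + 1) / 2 := by
          have : (i.toNat : Int) < (((a.length + 1) / 2 : Nat) : Int) := by
            rwa [Int.toNat_of_nonneg h0]
          exact_mod_cast this
        have hit1 : 1 ≤ i.toNat := by omega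
        refine ⟨a.length + i.toNat, by omega, by omega, by omega, ?_⟩
        rw [List.suffix_iff_eq_drop]
        have hjlen : ((a ++ a.take ((a.length + 1) / 2 - 1)).take (a.length + i.toNat)).length
            = a.length + i.toNat := by
          rw [List.length_take]; omega
        rw [hjlen, hml]
        have : a.length + i.toNat - a.length = i.toNat := by omega
        rw [this, pvWindow a i.toNat _ hwle (by omega)]
        exact hcond.symm
      · rintro ⟨j, hj1, hj2, hj3, hj4⟩
        rw [htlen] at hj2
        have hii1 : 1 ≤ j - a.length := by omega
        have hii2 : j - a.length ≤ (a.length + 1) / 2 - 1 := by omega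
        refine ⟨((j - a.length : Nat) : Int), ?_, ?_⟩
        · rw [PySem.List.mem_pyRange_one]
          constructor
          · exact_mod_cast hii1
          · exact_mod_cast (by omega : j - a.length < (a.length + 1) / 2)
        · rw [PySem.List.slice_from_natCast, PySem.List.slice_to_natCast]
          rw [List.suffix_iff_eq_drop] at hj4
          have hjlen : ((a ++ a.take ((a.length + 1) / 2 - 1)).take j).length = j := by
            rw [List.length_take]; omega
          rw [hjlen, hml] at hj4
          rw [pvWindow' a j _ hwle (by omega) (by omega)] at hj4
          exact hj4.symm
    rw [← hscan] at hiff
    rcases pvScan_LR m (pvPiLoop m (a.length - 1) ([0], 0)).1 a.length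
        (a ++ a.take ((a.length + 1) / 2 - 1)) 0 0 with hL | hR
    · rw [hL, if_pos (hiff.mpr hL)]
    · rw [hR, if_neg]
      intro hA
      rw [hiff] at hA
      rw [hA] at hR
      exact absurd hR (by decide)
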